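-- pv_equiv track=rewrite | github.com/Ariz-Kazani/python-sorting-algorithm-visualizer | sort.py | return_pyramid_inverted_list
-- ===== SOURCE A (Python) =====
-- def return_pyramid_inverted_list(len = 100):
--     list_a = [None] * len
--     pointer_a = len // 2 - 1
--     pointer_b = len  // 2
--
--     for i in range(1, len+1):
--         if i%2 == 0:
--             list_a[pointer_a] = i*6
--             pointer_a -= 1
--         else:
--             list_a[pointer_b] = i*6
--             pointer_b += 1
--     return list_a
-- ===== SOURCE B (Python) =====
-- def return_pyramid_inverted_list(len = 100):
--     c = len // 2
--     return [((2 * (j - c) + 1) if j >= c else (2 * (c - 1 - j) + 2)) * 6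
--             for j in range(len)]
-- ===== Notes on version B (the rewrite author's own statement) =====
-- stated objective: idiomatic
-- what changed: Replaces the stateful two-pointer fill of a preallocated [None]*len array by a single comprehension computing each cell's value in closed form from its index relative to the center.
import Mathlib
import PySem

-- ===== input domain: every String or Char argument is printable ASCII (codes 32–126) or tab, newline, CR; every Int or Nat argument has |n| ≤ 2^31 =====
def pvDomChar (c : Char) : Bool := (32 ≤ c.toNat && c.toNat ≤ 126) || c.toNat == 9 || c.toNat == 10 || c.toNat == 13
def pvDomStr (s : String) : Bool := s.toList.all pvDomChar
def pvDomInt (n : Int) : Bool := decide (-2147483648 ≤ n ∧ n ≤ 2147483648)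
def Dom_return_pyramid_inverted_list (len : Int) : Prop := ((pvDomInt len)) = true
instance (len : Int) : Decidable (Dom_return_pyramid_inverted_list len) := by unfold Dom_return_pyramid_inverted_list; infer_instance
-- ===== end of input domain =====

-- B replaces A's two-pointer in-place fill by a closed-form per-index comprehension (idiomatic; equivalence is about the return value).

-- ===== PORT A =====
-- loop body of A's 'for i in range(1, len+1)': state = (list_a, pointer_a, pointer_b)
def pvStepA (st : List (Option Int) × Int × Int) (i : Int) : List (Option Int) × Int × Int :=
  if PySem.Int.mod i 2 == 0 then
    (PySem.List.pySetD st.1 st.2.1 (some (i * 6)), st.2.1 - 1, st.2.2)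
  else
    (PySem.List.pySetD st.1 st.2.2 (some (i * 6)), st.2.1, st.2.2 + 1)

def return_pyramid_inverted_list (len : Int) : List Int :=
  -- list_a = [None] * len; cells are Option Int since Python starts from None
  let listA : List (Option Int) := List.replicate len.toNat none
  let pa := PySem.Int.floordiv len 2 - 1
  let pb := PySem.Int.floordiv len 2
  let st := (PySem.List.pyRange 1 (len + 1) 1).foldl pvStepA (listA, pa, pb)
  -- the loop assigns every cell (proved below), so unwrapping the Options is exact
  st.1.map (fun o => o.getD 0)

-- ===== PORT B =====
def return_pyramid_inverted_list_alt (len : Int) : List Int :=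
  let c := PySem.Int.floordiv len 2
  (PySem.List.pyRange 0 len 1).map (fun j =>
    (if c ≤ j then 2 * (j - c) + 1 else 2 * (c - 1 - j) + 2) * 6)

-- ===== PRECONDITION & SPEC =====
def Spec_return_pyramid_inverted_list (len : Int) (out : List Int) : Prop := out = return_pyramid_inverted_list_alt len
instance (len : Int) (out : List Int) : Decidable (Spec_return_pyramid_inverted_list len out) := by unfold Spec_return_pyramid_inverted_list; infer_instance

-- ===== CLAIM (what is proved, stated in full; the proofs are below) =====
def Claim_equal_return_pyramid_inverted_list : Prop := ∀ (len : Int), Dom_return_pyramid_inverted_list len → Spec_return_pyramid_inverted_list len (return_pyramid_inverted_list len)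

-- ===== LEMMAS AND PROOFS =====

-- value B computes at cell j (c = len // 2), as a function of Nat index
def pvVal (c j : Nat) : Int :=
  (if c ≤ j then 2 * ((j : Int) - c) + 1 else 2 * ((c : Int) - 1 - j) + 2) * 6

lemma pv_set_map_range {α : Type} (n j : Nat) (g : Nat → α) (v : α) :
    ((List.range n).map g).set j v
      = (List.range n).map (fun j' => if j' = j then v else g j') := by
  apply List.ext_getElem
  · simp
  · intro i h1 h2
    simp only [List.getElem_set, List.getElem_map, List.getElem_range]
    simp at h1
    by_cases hij : j = i
    · simp [hij]
    · rw [if_neg hij, if_neg (fun h => hij h.symm)]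

-- loop invariant: state after the first k iterations
lemma pvLoop_state (n : Nat) (hn : 1 ≤ n) (k : Nat) (hk : k ≤ n) :
    (PySem.List.pyRange 1 ((k : Int) + 1) 1).foldl pvStepA
      (List.replicate n (none : Option Int), ((n / 2 : Nat) : Int) - 1, ((n / 2 : Nat) : Int))
    = ((List.range n).map
         (fun j => if n / 2 - k / 2 ≤ j ∧ j < n / 2 + (k + 1) / 2 then some (pvVal (n / 2) j) else none),
       ((n / 2 : Nat) : Int) - 1 - ((k / 2 : Nat) : Int),
       ((n / 2 : Nat) : Int) + (((k + 1) / 2 : Nat) : Int)) := by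
  induction k with
  | zero =>
      rw [PySem.List.pyRange_one_eq_nil (by omega)]
      simp only [List.foldl_nil]
      simp only [Prod.mk.injEq]
      refine ⟨?_, by push_cast; ring, by norm_num⟩
      apply List.ext_getElem
      · simp
      · intro i h1 h2
        simp only [List.getElem_replicate, List.getElem_map, List.getElem_range]
        have hno : ¬(n / 2 - 0 / 2 ≤ i ∧ i < n / 2 + (0 + 1) / 2) := by omega
        rw [if_neg hno]
  | succ k ih =>
      have hk' : k ≤ n := by omega
      have hsplit : PySem.List.pyRange 1 ((k : Int) + 1 + 1) 1
          = PySem.List.pyRange 1 ((k : Int) + 1) 1 ++ [(k : Int) + 1] := by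
        have := PySem.List.pyRange_one_succ_right (show (1:Int) ≤ (k : Int) + 1 by omega)
        simpa using this
      have hcast : ((k : Int) + 1 + 1) = (((k : Nat) + 1 : Nat) : Int) + 1 := by push_cast; ring
      rw [← hcast, hsplit, List.foldl_append, ih hk']
      simp only [List.foldl_cons, List.foldl_nil]
      by_cases hpar : (k + 1) % 2 = 0
      · -- i = k+1 even: assign list[pointer_a], pointer_a -= 1
        have hmod : PySem.Int.mod ((k : Int) + 1) 2 = 0 := by
          have := PySem.Int.mod_natCast (k + 1) 2
          push_cast at this; rw [this]; exact_mod_cast hpar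
        simp only [pvStepA, hmod]
        rw [if_pos (show (((0:Int) == 0) = true) by decide)]
        -- index pointer_a = ↑(n/2) - 1 - ↑(k/2) = ↑(n/2 - 1 - k/2), a valid Nat index
        have hidx : ((n / 2 : Nat) : Int) - 1 - ((k / 2 : Nat) : Int)
            = ((n / 2 - 1 - k / 2 : Nat) : Int) := by push_cast; omega
        rw [hidx, PySem.List.pySetD_of_nonneg _ _ (by omega)]
        rw [Int.toNat_natCast, pv_set_map_range]
        simp only [Prod.mk.injEq]
        refine ⟨?_, by push_cast; omega, by push_cast; omega⟩
        apply List.map_congr_left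
        intro j hj
        simp only [List.mem_range] at hj
        by_cases hje : j = n / 2 - 1 - k / 2
        · rw [if_pos hje, if_pos (by omega)]
          subst hje
          unfold pvVal
          rw [if_neg (by omega)]
          congr 1
          push_cast; omega
        · rw [if_neg hje]
          by_cases hc : n / 2 - k / 2 ≤ j ∧ j < n / 2 + (k + 1) / 2
          · rw [if_pos hc, if_pos (by omega)]
          · rw [if_neg hc, if_neg (by omega)]
      · -- i = k+1 odd: assign list[pointer_b], pointer_b += 1
        have hmod : PySem.Int.mod ((k : Int) + 1) 2 = 1 := by
          have := PySem.Int.mod_natCast (k + 1) 2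
          push_cast at this; rw [this]
          have : (k + 1) % 2 = 1 := by omega
          exact_mod_cast this
        simp only [pvStepA, hmod]
        rw [if_neg (show ¬ (((1:Int) == 0) = true) by decide)]
        have hidx : ((n / 2 : Nat) : Int) + (((k + 1) / 2 : Nat) : Int)
            = ((n / 2 + (k + 1) / 2 : Nat) : Int) := by push_cast; ring
        rw [hidx, PySem.List.pySetD_of_nonneg _ _ (by omega)]
        rw [Int.toNat_natCast, pv_set_map_range]
        simp only [Prod.mk.injEq]
        refine ⟨?_, by push_cast; omega, by push_cast; omega⟩
        apply List.map_congr_left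
        intro j hj
        simp only [List.mem_range] at hj
        by_cases hje : j = n / 2 + (k + 1) / 2
        · rw [if_pos hje, if_pos (by omega)]
          subst hje
          unfold pvVal
          rw [if_pos (by omega)]
          congr 1
          push_cast; omega
        · rw [if_neg hje]
          by_cases hc : n / 2 - k / 2 ≤ j ∧ j < n / 2 + (k + 1) / 2
          · rw [if_pos hc, if_pos (by omega)]
          · rw [if_neg hc, if_neg (by omega)]

-- ===== VERDICT (by name: the statement is the Claim_ definition above) =====
theorem return_pyramid_inverted_list_spec : Claim_equal_return_pyramid_inverted_list := by
  intro len _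
  unfold Spec_return_pyramid_inverted_list return_pyramid_inverted_list return_pyramid_inverted_list_alt
  by_cases hneg : len ≤ 0
  · rw [PySem.List.pyRange_one_eq_nil (by omega), PySem.List.pyRange_one_eq_nil (by omega)]
    simp [Int.toNat_of_nonpos hneg]
  · rw [not_le] at hneg
    obtain ⟨n, rfl⟩ : ∃ n : Nat, len = (n : Int) := ⟨len.toNat, (Int.toNat_of_nonneg (by omega)).symm⟩
    have hn : 1 ≤ n := by exact_mod_cast hneg
    have hdiv : PySem.Int.floordiv (n : Int) 2 = ((n / 2 : Nat) : Int) := by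
      exact_mod_cast PySem.Int.floordiv_natCast n 2
    simp only [hdiv, Int.toNat_natCast]
    rw [pvLoop_state n hn n le_rfl]
    simp only
    rw [PySem.List.pyRange_one 0 (n : Int)]
    have hlen : (((n : Int) - 0).toNat) = n := by omega
    rw [hlen, List.map_map, List.map_map]
    apply List.map_congr_left
    intro j hj
    simp only [List.mem_range] at hj
    simp only [Function.comp]
    rw [if_pos (by omega)]
    unfold pvVal
    by_cases hc : n / 2 ≤ j
    · rw [if_pos hc, if_pos (by push_cast; omega)]
      simp
    · rw [if_neg hc, if_neg (by push_cast; omega)]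
      simp
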